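-- pv_equiv track=rewrite | github.com/stephendonner/mozapkpublisher | mozapkpublisher/push_apk.py | _split_apk_metadata_per_package_name
-- ===== SOURCE A (Python) =====
-- def _split_apk_metadata_per_package_name(apks_metadata_per_paths):
--     split_apk_metadata = {}
--     for (apk_path, metadata) in apks_metadata_per_paths.items():
--         package_name = metadata['package_name']
--         if package_name not in split_apk_metadata:
--             split_apk_metadata[package_name] = {}
--         split_apk_metadata[package_name].update({apk_path: metadata})
--
--     return split_apk_metadata
-- ===== SOURCE B (Python) =====
-- def _split_apk_metadata_per_package_name(apks_metadata_per_paths):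
--     items = apks_metadata_per_paths.items()
--     package_names = dict.fromkeys(metadata['package_name'] for _, metadata in items)
--     return {
--         package_name: {
--             apk_path: metadata
--             for apk_path, metadata in items
--             if metadata['package_name'] == package_name
--         }
--         for package_name in package_names
--     }
-- ===== Notes on version B (the rewrite author's own statement) =====
-- stated objective: alternative
-- what changed: Replaces A's single running-accumulation pass with inner dict updates by a two-phase group-by: collect the distinct package names in first-occurrence order with dict.fromkeys, then build each group independently by a filtering dict comprehension over the items.
import Mathlib
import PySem

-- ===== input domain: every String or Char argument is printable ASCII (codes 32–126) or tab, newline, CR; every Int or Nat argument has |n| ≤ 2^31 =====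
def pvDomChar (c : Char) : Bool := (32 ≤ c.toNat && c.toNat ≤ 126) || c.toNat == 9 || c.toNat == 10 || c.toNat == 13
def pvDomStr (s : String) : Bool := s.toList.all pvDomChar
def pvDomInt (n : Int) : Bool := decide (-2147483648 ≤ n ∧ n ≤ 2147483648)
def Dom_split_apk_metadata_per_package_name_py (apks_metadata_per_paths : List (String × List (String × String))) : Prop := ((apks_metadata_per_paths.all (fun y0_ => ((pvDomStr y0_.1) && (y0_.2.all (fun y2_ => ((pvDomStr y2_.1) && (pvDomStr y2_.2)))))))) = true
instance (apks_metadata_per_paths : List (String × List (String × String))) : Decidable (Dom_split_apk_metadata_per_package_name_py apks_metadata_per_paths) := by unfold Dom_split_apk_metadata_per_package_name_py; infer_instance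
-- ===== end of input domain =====

-- B groups by a two-phase pass (distinct package names first, then one filtering comprehension per name)
-- instead of A's single accumulating pass; objective: alternative decomposition, equal return value.

-- ===== PORT A =====
-- metadata['package_name'] (the "" default is unreachable under Pre_, which demands the key)
def pvPkg (metadata : List (String × String)) : String :=
  (PySem.Dict.mk metadata).getD "package_name" ""

def split_apk_metadata_per_package_name_py (apks_metadata_per_paths : List (String × List (String × String))) : List (String × List (String × List (String × String))) :=
  let split_apk_metadata :=
    apks_metadata_per_paths.foldl
      (fun (acc : PySem.Dict String (PySem.Dict String (List (String × String)))) pm =>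
        let package_name := pvPkg pm.2
        -- 'if package_name not in …: … = {}' then '.update({apk_path: metadata})'
        let inner := acc.getD package_name PySem.Dict.empty
        acc.insert package_name (inner.insert pm.1 pm.2))
      PySem.Dict.empty
  split_apk_metadata.items.map (fun p => (p.1, p.2.items))

-- ===== PORT B =====
-- package_names = dict.fromkeys(metadata['package_name'] for _, metadata in items)
def pvNamesB (apks_metadata_per_paths : List (String × List (String × String))) : List String :=
  PySem.List.dedup (apks_metadata_per_paths.map (fun pm => pvPkg pm.2))

-- {apk_path: metadata for apk_path, metadata in items if metadata['package_name'] == package_name}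
def pvGroupB (apks_metadata_per_paths : List (String × List (String × String))) (package_name : String) : List (String × List (String × String)) :=
  (apks_metadata_per_paths.foldl
    (fun (d : PySem.Dict String (List (String × String))) pm =>
      if pvPkg pm.2 == package_name then d.insert pm.1 pm.2 else d)
    PySem.Dict.empty).items

def split_apk_metadata_per_package_name_py_alt (apks_metadata_per_paths : List (String × List (String × String))) : List (String × List (String × List (String × String))) :=
  (pvNamesB apks_metadata_per_paths).map
    (fun package_name => (package_name, pvGroupB apks_metadata_per_paths package_name))

-- ===== PRECONDITION & SPEC =====
-- Pre_ excludes inputs whose metadata lacks a 'package_name' key (Python A raises KeyError there) and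
-- association lists with duplicate keys (outer or inner), which a Python dict argument cannot carry.
def Pre_split_apk_metadata_per_package_name_py (apks_metadata_per_paths : List (String × List (String × String))) : Prop :=
  (apks_metadata_per_paths.map Prod.fst).Nodup ∧
  ∀ pm ∈ apks_metadata_per_paths, (pm.2.map Prod.fst).Nodup ∧ "package_name" ∈ pm.2.map Prod.fst
instance (apks_metadata_per_paths : List (String × List (String × String))) : Decidable (Pre_split_apk_metadata_per_package_name_py apks_metadata_per_paths) := by unfold Pre_split_apk_metadata_per_package_name_py; infer_instance

def pvWitness_split_apk_metadata_per_package_name_py : (List (String × List (String × String))) :=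
  [("a.apk", [("package_name", "org.example.a")]), ("b.apk", [("package_name", "org.example.a")])]

def Spec_split_apk_metadata_per_package_name_py (apks_metadata_per_paths : List (String × List (String × String))) (out : List (String × List (String × List (String × String)))) : Prop := out = split_apk_metadata_per_package_name_py_alt apks_metadata_per_paths
instance (apks_metadata_per_paths : List (String × List (String × String))) (out : List (String × List (String × List (String × String)))) : Decidable (Spec_split_apk_metadata_per_package_name_py apks_metadata_per_paths out) := by unfold Spec_split_apk_metadata_per_package_name_py; infer_instance

-- ===== CLAIM (what is proved, stated in full; the proofs are below) =====
def Claim_equal_split_apk_metadata_per_package_name_py : Prop := ∀ (apks_metadata_per_paths : List (String × List (String × String))), Dom_split_apk_metadata_per_package_name_py apks_metadata_per_paths → Pre_split_apk_metadata_per_package_name_py apks_metadata_per_paths → Spec_split_apk_metadata_per_package_name_py apks_metadata_per_paths (split_apk_metadata_per_package_name_py apks_metadata_per_paths)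

-- ===== LEMMAS AND PROOFS =====

-- A's accumulating fold, named for the induction
def pvFoldA (xs : List (String × List (String × String))) : PySem.Dict String (PySem.Dict String (List (String × String))) :=
  xs.foldl
    (fun acc pm =>
      acc.insert (pvPkg pm.2) ((acc.getD (pvPkg pm.2) PySem.Dict.empty).insert pm.1 pm.2))
    PySem.Dict.empty

-- B's per-name group as a Dict (pvGroupB is its .items)
def pvInnerD (xs : List (String × List (String × String))) (n : String) : PySem.Dict String (List (String × String)) :=
  xs.foldl
    (fun d pm => if pvPkg pm.2 == n then d.insert pm.1 pm.2 else d)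
    PySem.Dict.empty

lemma pvInnerD_append (xs : List (String × List (String × String))) (pm : String × List (String × String)) (n : String) :
    pvInnerD (xs ++ [pm]) n = if pvPkg pm.2 == n then (pvInnerD xs n).insert pm.1 pm.2 else pvInnerD xs n := by
  simp [pvInnerD, List.foldl_append]

lemma pvInnerD_empty (xs : List (String × List (String × String))) (n : String)
    (h : ∀ pm ∈ xs, pvPkg pm.2 ≠ n) : pvInnerD xs n = PySem.Dict.empty := by
  induction xs with
  | nil => rfl
  | cons hd tl ih =>
    have h1 : pvPkg hd.2 ≠ n := h hd (by simp)
    have : pvInnerD (hd :: tl) n =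
        tl.foldl (fun d pm => if pvPkg pm.2 == n then d.insert pm.1 pm.2 else d)
          (if pvPkg hd.2 == n then (PySem.Dict.empty).insert hd.1 hd.2 else PySem.Dict.empty) := rfl
    rw [this, if_neg (by simpa using h1)]
    exact ih (fun pm hpm => h pm (by simp [hpm]))

lemma pvNamesB_append (xs : List (String × List (String × String))) (pm : String × List (String × String)) :
    pvNamesB (xs ++ [pm]) = PySem.Set.add (pvNamesB xs) (pvPkg pm.2) := by
  simp [pvNamesB, PySem.List.dedup_eq_ofList, PySem.Set.ofList, List.foldl_append]

lemma pvFoldA_keys (xs : List (String × List (String × String))) :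
    (pvFoldA xs).keys = pvNamesB xs := by
  have := PySem.Dict.keys_foldl_insert_key xs (fun pm => pvPkg pm.2)
    (fun acc pm => (acc.getD (pvPkg pm.2) PySem.Dict.empty).insert pm.1 pm.2) PySem.Dict.empty
  simpa [pvFoldA, pvNamesB, PySem.List.dedup_eq_ofList, PySem.Set.ofList, PySem.Set.update,
    PySem.Dict.keys_empty, PySem.Set.empty] using this

lemma pvFoldA_keys_nodup (xs : List (String × List (String × String))) :
    (pvFoldA xs).keys.Nodup := by
  rw [pvFoldA_keys]
  exact PySem.List.nodup_dedup _

lemma pvMain (xs : List (String × List (String × String))) :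
    (pvFoldA xs).items = (pvNamesB xs).map (fun n => (n, pvInnerD xs n)) := by
  induction xs using List.reverseRecOn with
  | nil => rfl
  | append_singleton xs pm ih =>
    have hstep : pvFoldA (xs ++ [pm]) =
        (pvFoldA xs).insert (pvPkg pm.2)
          (((pvFoldA xs).getD (pvPkg pm.2) PySem.Dict.empty).insert pm.1 pm.2) := by
      simp [pvFoldA, List.foldl_append]
    rw [hstep, pvNamesB_append]
    by_cases hmem : pvPkg pm.2 ∈ pvNamesB xs
    · -- the package name was already seen
      have hcont : (pvFoldA xs).contains (pvPkg pm.2) = true := by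
        rw [PySem.Dict.contains_iff_mem_keys, pvFoldA_keys]; exact hmem
      have hin : (pvPkg pm.2, pvInnerD xs (pvPkg pm.2)) ∈ (pvFoldA xs).items := by
        rw [ih]; exact List.mem_map.2 ⟨pvPkg pm.2, hmem, rfl⟩
      have hgetD : (pvFoldA xs).getD (pvPkg pm.2) PySem.Dict.empty = pvInnerD xs (pvPkg pm.2) :=
        PySem.Dict.getD_of_mem_items _ hin (pvFoldA_keys_nodup xs) _
      have hadd : PySem.Set.add (pvNamesB xs) (pvPkg pm.2) = pvNamesB xs := by
        simp [PySem.Set.add, PySem.Set.contains, hmem]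
      rw [PySem.Dict.items_insert_of_contains _ _ hcont, ih, hgetD, hadd, List.map_map]
      refine List.map_congr_left (fun n hn => ?_)
      by_cases he : n = pvPkg pm.2
      · subst he; simp [pvInnerD_append]
      · simp only [Function.comp]
        rw [if_neg (by simpa using he), pvInnerD_append,
          if_neg (by simpa using (Ne.symm he))]
    · -- a fresh package name
      have hcont : (pvFoldA xs).contains (pvPkg pm.2) = false := by
        rw [Bool.eq_false_iff]
        intro hc
        have := (PySem.Dict.contains_iff_mem_keys _ _).1 hc
        rw [pvFoldA_keys] at this
        exact hmem this
      have hgetD : (pvFoldA xs).getD (pvPkg pm.2) PySem.Dict.empty = PySem.Dict.empty :=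
        PySem.Dict.getD_of_not_contains _ _ hcont
      have hnone : ∀ q ∈ xs, pvPkg q.2 ≠ pvPkg pm.2 := by
        intro q hq he
        exact hmem (by
          unfold pvNamesB
          rw [PySem.List.mem_dedup]
          exact List.mem_map.2 ⟨q, hq, he⟩)
      have hadd : PySem.Set.add (pvNamesB xs) (pvPkg pm.2) = pvNamesB xs ++ [pvPkg pm.2] := by
        simp [PySem.Set.add, PySem.Set.contains, hmem]
      rw [PySem.Dict.items_insert_of_not_contains _ _ hcont, ih, hgetD, hadd, List.map_append]
      congr 1
      · refine List.map_congr_left (fun n hn => ?_)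
        have hne : pvPkg pm.2 ≠ n := fun he => hmem (he ▸ hn)
        rw [pvInnerD_append, if_neg (by simpa using hne)]
      · simp [pvInnerD_append, pvInnerD_empty xs _ hnone]

-- ===== VERDICT (by name: the statement is the Claim_ definition above) =====
theorem split_apk_metadata_per_package_name_py_spec : Claim_equal_split_apk_metadata_per_package_name_py := by
  intro xs _hdom _hpre
  unfold Spec_split_apk_metadata_per_package_name_py
  show (pvFoldA xs).items.map (fun p => (p.1, p.2.items)) = _
  rw [pvMain, List.map_map]
  rfl
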